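-- pv_equiv track=rewrite | github.com/mahendrasuthar/CST_JIET_Assignments | Mahendra Suthar/11-05-2020/Question4.py | calc
-- ===== SOURCE A (Python) =====
-- MOD=10^9+7
--
-- def calc(n):
--     if n < 0:
--         return 1
--     arr = [0 for i in range(n+2)]
--     arr[0] = arr[1] = 1
--
--     for i in range(2,n+1):
--         for j in range(i+1):
--             arr[i] = (arr[i] + arr[j] * arr[i-j-1]) % MOD
--
--     return arr[n]
-- ===== SOURCE B (Python) =====
-- MOD = 10 ^ 9 + 7  # same constant as A: Python ^ is XOR, so this is 10 ^ 16 == 26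
--
-- def calc(n):
--     if n < 0:
--         return 1
--     c = 1
--     for m in range(n):
--         c = c * 2 * (2 * m + 1) // (m + 2)  # exact: (m+2)*C(m+1) == 2*(2m+1)*C(m)
--     return c % MOD
-- ===== Notes on version B (the rewrite author's own statement) =====
-- stated objective: faster
-- what changed: Replaces the quadratic convolution DP array (reduced mod the module constant at every step) by the linear exact Catalan product recurrence with one exact integer division per step, reducing mod the same constant once at the end.
import Mathlib
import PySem

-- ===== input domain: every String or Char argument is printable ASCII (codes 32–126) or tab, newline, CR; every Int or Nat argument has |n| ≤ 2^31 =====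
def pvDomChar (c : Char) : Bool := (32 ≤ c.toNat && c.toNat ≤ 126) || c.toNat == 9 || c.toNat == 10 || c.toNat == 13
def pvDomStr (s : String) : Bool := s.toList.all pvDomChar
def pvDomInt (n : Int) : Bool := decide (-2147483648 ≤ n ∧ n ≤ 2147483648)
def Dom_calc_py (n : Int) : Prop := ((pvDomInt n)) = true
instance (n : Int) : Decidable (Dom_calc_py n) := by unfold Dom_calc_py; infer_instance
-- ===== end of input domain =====

-- B replaces A's quadratic convolution DP by the linear exact Catalan product recurrence, reducing mod the same module constant once at the end (objective: faster; measured faster in a timing run).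

-- ===== PORT A =====
-- MOD = 10^9+7  (Python ^ is XOR and binds looser than +: 10 xor 16 = 26)
def MOD_A : Int := PySem.Int.bxor 10 (9 + 7)

def calc_py (n : Int) : Int :=
  if n < 0 then 1
  else
    let arr0 : List Int := List.replicate (n + 2).toNat 0
    -- arr[0] = arr[1] = 1
    let arr1 := PySem.List.pySetD (PySem.List.pySetD arr0 0 1) 1 1
    let arr2 := (PySem.List.pyRange 2 (n + 1) 1).foldl
      (fun a i => (PySem.List.pyRange 0 (i + 1) 1).foldl
        (fun a j => PySem.List.pySetD a i
          (PySem.Int.mod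
            (PySem.List.pyGetD a i 0 + PySem.List.pyGetD a j 0 * PySem.List.pyGetD a (i - j - 1) 0)
            MOD_A)) a) arr1
    PySem.List.pyGetD arr2 n 0

-- ===== PORT B =====
def MOD_B : Int := PySem.Int.bxor 10 (9 + 7)

def calc_py_alt (n : Int) : Int :=
  if n < 0 then 1
  else
    let c := (PySem.List.pyRange 0 n 1).foldl
      (fun c m => PySem.Int.floordiv (c * 2 * (2 * m + 1)) (m + 2)) 1
    PySem.Int.mod c MOD_B

-- ===== PRECONDITION & SPEC =====
def Spec_calc_py (n : Int) (out : Int) : Prop := out = calc_py_alt n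
instance (n : Int) (out : Int) : Decidable (Spec_calc_py n out) := by unfold Spec_calc_py; infer_instance

-- ===== CLAIM (what is proved, stated in full; the proofs are below) =====
def Claim_equal_calc_py : Prop := ∀ (n : Int), Dom_calc_py n → Spec_calc_py n (calc_py n)

-- ===== LEMMAS AND PROOFS =====

-- the value A keeps at every filled slot: catalan k mod 26
def gcat (k : Nat) : Int := (catalan k : Int) % 26

lemma mod_a_eq : MOD_A = 26 := by decide
lemma mod_b_eq : MOD_B = 26 := by decide

-- exact Catalan recurrence used by B
lemma cat_rec (m : Nat) :
    (m + 2) * catalan (m + 1) = 2 * (2 * m + 1) * catalan m := by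
  have h1 := Nat.succ_mul_centralBinom_succ m
  have h2 := succ_mul_catalan_eq_centralBinom m
  have h3 := succ_mul_catalan_eq_centralBinom (m + 1)
  have : (m + 1) * ((m + 2) * catalan (m + 1)) =
      (m + 1) * (2 * (2 * m + 1) * catalan m) := by
    calc (m + 1) * ((m + 2) * catalan (m + 1))
        = (m + 1) * ((m + 1 + 1) * catalan (m + 1)) := by ring
      _ = (m + 1) * (m + 1).centralBinom := by rw [h3]
      _ = 2 * (2 * m + 1) * m.centralBinom := h1
      _ = 2 * (2 * m + 1) * ((m + 1) * catalan m) := by rw [h2]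
      _ = (m + 1) * (2 * (2 * m + 1) * catalan m) := by ring
  exact Nat.eq_of_mul_eq_mul_left (by omega) this

-- B's loop computes catalan exactly
lemma b_fold (N : Nat) :
    (PySem.List.pyRange 0 (N : Int) 1).foldl
      (fun c m => PySem.Int.floordiv (c * 2 * (2 * m + 1)) (m + 2)) 1
    = (catalan N : Int) := by
  induction N with
  | zero => simp [PySem.List.pyRange_one_eq_nil]
  | succ N ih =>
    have hcast : ((N + 1 : Nat) : Int) = (N : Int) + 1 := by push_cast; ring
    rw [hcast, PySem.List.pyRange_one_succ_right (by positivity), List.foldl_append, ih]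
    simp only [List.foldl_cons, List.foldl_nil]
    have hpos : (0 : Int) < (N : Int) + 2 := by positivity
    rw [PySem.Int.floordiv_eq_ediv_of_pos hpos]
    have hrec : (catalan N : Int) * 2 * (2 * (N : Int) + 1)
        = (catalan (N + 1) : Int) * ((N : Int) + 2) := by
      have := cat_rec N
      have := congrArg (fun x : Nat => (x : Int)) this
      push_cast at this
      linarith
    rw [hrec, Int.mul_ediv_cancel _ (by omega)]

-- convolution identity mod 26
lemma conv_mod (i : Nat) (hi : 1 ≤ i) :
    (∑ j ∈ Finset.range i, gcat j * gcat (i - 1 - j)) % 26 = gcat i := by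
  obtain ⟨p, rfl⟩ : ∃ p, i = p + 1 := ⟨i - 1, by omega⟩
  have hcat : (catalan (p + 1) : Int)
      = ∑ j ∈ Finset.range (p + 1), (catalan j : Int) * (catalan (p - j) : Int) := by
    rw [catalan_succ p]
    push_cast
    exact Fin.sum_univ_eq_sum_range (fun j => ((catalan j : Int) * (catalan (p - j) : Int))) (p + 1)
  have hidx : ∀ j : Nat, p + 1 - 1 - j = p - j := by omega
  calc (∑ j ∈ Finset.range (p + 1), gcat j * gcat (p + 1 - 1 - j)) % 26
      = (∑ j ∈ Finset.range (p + 1), ((catalan j : Int) * (catalan (p - j) : Int)) % 26) % 26 := by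
        rw [Finset.sum_int_mod]
        congr 1
        refine Finset.sum_congr rfl (fun j _ => ?_)
        simp only [gcat, hidx]
        rw [← Int.mul_emod]
    _ = (∑ j ∈ Finset.range (p + 1), (catalan j : Int) * (catalan (p - j) : Int)) % 26 := by
        rw [← Finset.sum_int_mod]
    _ = gcat (p + 1) := by rw [← hcat, gcat]

-- the inner loop, partial: first m steps (m ≤ i)
lemma inner_partial (i : Nat) (arr : List Int) (hi2 : 2 ≤ i) (hiL : i + 1 < arr.length)
    (hbelow : ∀ k, k < i → arr.getD k 0 = gcat k)
    (habove : ∀ k, i ≤ k → arr.getD k 0 = 0) :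
    ∀ m : Nat, 1 ≤ m → m ≤ i →
    (PySem.List.pyRange 0 (m : Int) 1).foldl
      (fun a j => PySem.List.pySetD a (i : Int)
        (PySem.Int.mod
          (PySem.List.pyGetD a (i : Int) 0 + PySem.List.pyGetD a j 0 * PySem.List.pyGetD a ((i : Int) - j - 1) 0)
          MOD_A)) arr
    = arr.set i ((∑ j ∈ Finset.range m, gcat j * gcat (i - 1 - j)) % 26) := by
  have hilen : i < arr.length := by omega
  intro m
  induction m with
  | zero => omega
  | succ m ih =>
    intro _ hmi
    by_cases hm0 : m = 0
    · -- first iteration: j = 0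
      subst hm0
      rw [show ((0 + 1 : Nat) : Int) = 0 + 1 by norm_num, PySem.List.pyRange_one_singleton]
      simp only [List.foldl_cons, List.foldl_nil]
      have h1 : PySem.List.pyGetD arr ((i : Nat) : Int) 0 = 0 := by
        simp only [PySem.List.pyGetD_natCast]
        exact habove i le_rfl
      have h2 : PySem.List.pyGetD arr (0 : Int) 0 = gcat 0 := by
        rw [show (0 : Int) = ((0 : Nat) : Int) by norm_num, PySem.List.pyGetD_natCast]
        exact hbelow 0 (by omega)
      have h3 : PySem.List.pyGetD arr ((i : Int) - 0 - 1) 0 = gcat (i - 1) := by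
        rw [show (i : Int) - 0 - 1 = ((i - 1 : Nat) : Int) by push_cast [Nat.cast_sub (by omega : 1 ≤ i)]; ring,
            PySem.List.pyGetD_natCast]
        exact hbelow (i - 1) (by omega)
      rw [h1, h2, h3, PySem.List.pySetD_natCast, mod_a_eq,
          PySem.Int.mod_eq_emod_of_pos (by norm_num)]
      congr 1
      rw [Finset.sum_range_one]
      norm_num
    · -- step m → m+1, 1 ≤ m < i
      have hm1 : 1 ≤ m := by omega
      rw [show ((m + 1 : Nat) : Int) = (m : Int) + 1 by push_cast; ring,
          PySem.List.pyRange_one_succ_right (by positivity), List.foldl_append,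
          ih hm1 (by omega)]
      simp only [List.foldl_cons, List.foldl_nil]
      set S := (∑ j ∈ Finset.range m, gcat j * gcat (i - 1 - j)) % 26 with hS
      have h1 : PySem.List.pyGetD (arr.set i S) ((i : Nat) : Int) 0 = S := by
        simp only [PySem.List.pyGetD_natCast, List.getD]
        rw [List.getElem?_set_self (by omega)]
        rfl
      have h2 : PySem.List.pyGetD (arr.set i S) ((m : Nat) : Int) 0 = gcat m := by
        simp only [PySem.List.pyGetD_natCast, List.getD]
        rw [List.getElem?_set_ne (by omega)]
        have := hbelow m (by omega)
        simpa [List.getD] using this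
      have h3 : PySem.List.pyGetD (arr.set i S) ((i : Int) - (m : Int) - 1) 0 = gcat (i - 1 - m) := by
        rw [show (i : Int) - (m : Int) - 1 = ((i - 1 - m : Nat) : Int) by omega,
            PySem.List.pyGetD_natCast]
        simp only [List.getD]
        rw [List.getElem?_set_ne (by omega)]
        have := hbelow (i - 1 - m) (by omega)
        simpa [List.getD] using this
      rw [h1, h2, h3, PySem.List.pySetD_natCast, List.set_set, mod_a_eq,
          PySem.Int.mod_eq_emod_of_pos (by norm_num)]
      congr 1
      rw [Finset.sum_range_succ, hS]
      generalize (∑ j ∈ Finset.range m, gcat j * gcat (i - 1 - j)) = X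
      generalize gcat m * gcat (i - 1 - m) = t
      omega

-- the full inner loop (j = 0 .. i)
lemma inner_full (i : Nat) (arr : List Int) (hi2 : 2 ≤ i) (hiL : i + 1 < arr.length)
    (hbelow : ∀ k, k < i → arr.getD k 0 = gcat k)
    (habove : ∀ k, i ≤ k → arr.getD k 0 = 0) :
    (PySem.List.pyRange 0 ((i : Int) + 1) 1).foldl
      (fun a j => PySem.List.pySetD a (i : Int)
        (PySem.Int.mod
          (PySem.List.pyGetD a (i : Int) 0 + PySem.List.pyGetD a j 0 * PySem.List.pyGetD a ((i : Int) - j - 1) 0)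
          MOD_A)) arr
    = arr.set i (gcat i) := by
  rw [PySem.List.pyRange_one_succ_right (by positivity), List.foldl_append,
      inner_partial i arr hi2 hiL hbelow habove i (by omega) le_rfl]
  simp only [List.foldl_cons, List.foldl_nil]
  set S := (∑ j ∈ Finset.range i, gcat j * gcat (i - 1 - j)) % 26 with hS
  have h1 : PySem.List.pyGetD (arr.set i S) ((i : Nat) : Int) 0 = S := by
    simp only [PySem.List.pyGetD_natCast, List.getD]
    rw [List.getElem?_set_self (by omega)]
    rfl
  have h3 : PySem.List.pyGetD (arr.set i S) ((i : Int) - (i : Int) - 1) 0 = 0 := by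
    rw [show (i : Int) - (i : Int) - 1 = -1 by ring,
        PySem.List.pyGetD_neg_ofNat (arr.set i S) 1 0 (by omega) (by rw [List.length_set]; omega)]
    rw [List.getElem_set_ne (by simp; omega)]
    have := habove (arr.length - 1) (by omega)
    rw [List.getD_eq_getElem _ _ (by omega)] at this
    simpa using this
  rw [h1, h3, PySem.List.pySetD_natCast, List.set_set, mod_a_eq,
      PySem.Int.mod_eq_emod_of_pos (by norm_num)]
  rw [mul_zero, add_zero, hS, Int.emod_emod_of_dvd _ dvd_rfl]
  rw [conv_mod i (by omega)]

-- the outer loop establishes gcat at every index < n+1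
lemma outer_fold (n : Int) (hn : 0 ≤ n) :
    ∀ (d : Nat) (i : Nat) (arr : List Int), 2 ≤ i → (i : Int) + d = n + 1 →
    arr.length = n.toNat + 2 →
    (∀ k, k < i → arr.getD k 0 = gcat k) →
    (∀ k, i ≤ k → arr.getD k 0 = 0) →
    ∀ k, k < n.toNat + 1 →
    ((PySem.List.pyRange (i : Int) (n + 1) 1).foldl
      (fun a i => (PySem.List.pyRange 0 (i + 1) 1).foldl
        (fun a j => PySem.List.pySetD a i
          (PySem.Int.mod
            (PySem.List.pyGetD a i 0 + PySem.List.pyGetD a j 0 * PySem.List.pyGetD a (i - j - 1) 0)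
            MOD_A)) a) arr).getD k 0 = gcat k := by
  intro d
  induction d with
  | zero =>
    intro i arr hi2 hieq hlen hbelow habove k hk
    rw [PySem.List.pyRange_one_eq_nil (by omega)]
    exact hbelow k (by omega)
  | succ d ih =>
    intro i arr hi2 hieq hlen hbelow habove k hk
    rw [PySem.List.pyRange_one_cons (by omega), List.foldl_cons]
    have hiL : i + 1 < arr.length := by omega
    rw [inner_full i arr hi2 hiL hbelow habove]
    have hset : ∀ k', (arr.set i (gcat i)).getD k' 0 = if k' = i then gcat i else arr.getD k' 0 := by
      intro k'
      by_cases hk' : k' = i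
      · subst hk'
        simp only [List.getD, if_pos]
        rw [List.getElem?_set_self (by omega)]
        rfl
      · simp only [List.getD, if_neg hk']
        rw [List.getElem?_set_ne (fun h => hk' h.symm)]
    have := ih (i + 1) (arr.set i (gcat i)) (by omega) (by push_cast; omega)
      (by rw [List.length_set]; omega)
      (fun k' hk' => by
        rw [hset]
        by_cases h : k' = i
        · simp [h]
        · rw [if_neg h]; exact hbelow k' (by omega))
      (fun k' hk' => by
        rw [hset, if_neg (by omega)]
        exact habove k' (by omega)) k hk
    rw [show ((i + 1 : Nat) : Int) = (i : Int) + 1 by push_cast; ring] at this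
    exact this

-- ===== VERDICT (by name: the statement is the Claim_ definition above) =====
theorem calc_py_spec : Claim_equal_calc_py := by
  intro n _
  unfold Spec_calc_py
  by_cases hneg : n < 0
  · simp [calc_py, calc_py_alt, hneg]
  · rw [not_lt] at hneg
    obtain ⟨N, rfl⟩ : ∃ N : Nat, n = (N : Int) := ⟨n.toNat, by omega⟩
    by_cases hN0 : N = 0
    · subst hN0
      decide
    · -- B side value
      have hB : calc_py_alt (N : Int) = gcat N := by
        simp only [calc_py_alt]
        rw [if_neg (by omega : ¬ ((N : Int) < 0))]
        rw [b_fold N, mod_b_eq, PySem.Int.mod_eq_emod_of_pos (by norm_num), gcat]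
      -- A side
      have hL : ((N : Int) + 2).toNat = N + 2 := by omega
      simp only [calc_py]
      rw [if_neg (by omega : ¬ ((N : Int) < 0)), hL]
      have h01 : PySem.List.pySetD (PySem.List.pySetD (List.replicate (N + 2) (0 : Int)) 0 1) 1 1
          = ((List.replicate (N + 2) (0 : Int)).set 0 1).set 1 1 := by
        simp [PySem.List.pySetD_of_nonneg]
      rw [h01]
      set arr1 := ((List.replicate (N + 2) (0 : Int)).set 0 1).set 1 1 with harr1
      have hlen1 : arr1.length = N + 2 := by simp [harr1]
      have hbelow1 : ∀ k, k < 2 → arr1.getD k 0 = gcat k := by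
        intro k hk
        interval_cases k
        · simp only [harr1, List.getD]
          rw [List.getElem?_set_ne (by omega), List.getElem?_set_self (by simp)]
          simp [gcat]
        · simp only [harr1, List.getD]
          rw [List.getElem?_set_self (by simp)]
          simp [gcat, catalan_one]
      have habove1 : ∀ k, 2 ≤ k → arr1.getD k 0 = 0 := by
        intro k hk
        simp only [harr1, List.getD]
        rw [List.getElem?_set_ne (by omega), List.getElem?_set_ne (by omega),
            List.getElem?_replicate]
        split <;> simp
      have hout := outer_fold (N : Int) (by positivity) (N - 1) 2 arr1 le_rfl
        (by push_cast; omega) (by omega) hbelow1 habove1 N (by omega)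
      rw [show (((2 : Nat) : Int)) = 2 by norm_num] at hout
      simp only [PySem.List.pyGetD_natCast]
      rw [hout, hB]
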